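-- pv_equiv track=rewrite | github.com/S3B4S/advent-of-code-2018 | Day 02 - Inventory Management System/main.py | count_valid_boxes
-- ===== SOURCE A (Python) =====
-- def count_valid_boxes(acc, curr):
--     twos = 0
--     threes = 0
--
--     for char in curr:
--         count = curr.count(char)
--         if (twos == 0 and count == 2):
--             twos = 1
--         if (threes == 0 and count == 3):
--             threes = 1
--         if (twos == 1 and threes == 1):
--             break
--
--     return (acc[0] + twos, acc[1] + threes)
-- ===== SOURCE B (Python) =====
-- def count_valid_boxes(acc, curr):
--     # Sort the characters, then run-length encode the sorted sequence in one
--     # linear scan; equal characters are adjacent, so run lengths are the counts.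
--     runs = []
--     prev = None
--     run = 0
--     for ch in sorted(curr):
--         if ch == prev:
--             run += 1
--         else:
--             if run:
--                 runs.append(run)
--             prev = ch
--             run = 1
--     if run:
--         runs.append(run)
--     twos = 1 if 2 in runs else 0
--     threes = 1 if 3 in runs else 0
--     return (acc[0] + twos, acc[1] + threes)
-- ===== Notes on version B (the rewrite author's own statement) =====
-- stated objective: faster
-- what changed: B sorts the characters and run-length encodes the sorted sequence in one linear scan (run lengths are the character counts), then tests whether 2 or 3 is among the run lengths, instead of A's per-character repeated curr.count scan with early break.
import Mathlib
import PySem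

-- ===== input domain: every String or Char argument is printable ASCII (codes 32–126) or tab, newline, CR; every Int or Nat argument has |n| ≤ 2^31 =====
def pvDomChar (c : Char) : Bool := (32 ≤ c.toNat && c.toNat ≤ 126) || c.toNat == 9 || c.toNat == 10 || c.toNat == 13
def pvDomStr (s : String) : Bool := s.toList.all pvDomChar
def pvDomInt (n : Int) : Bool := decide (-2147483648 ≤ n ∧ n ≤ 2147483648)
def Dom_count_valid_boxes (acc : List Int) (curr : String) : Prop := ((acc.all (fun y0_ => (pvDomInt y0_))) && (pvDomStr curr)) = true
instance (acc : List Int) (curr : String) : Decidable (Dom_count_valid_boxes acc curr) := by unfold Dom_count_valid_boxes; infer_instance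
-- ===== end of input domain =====

-- B replaces A's per-character repeated curr.count scan (with early break) by sorting the
-- characters and run-length encoding the sorted sequence in one linear scan, then testing
-- whether 2 or 3 is among the run lengths (objective: faster, O(n log n) vs O(n^2)).

-- ===== PORT A =====
-- 'for char in curr' with mutable twos/threes and 'break' = structural recursion over the
-- remaining characters; curr.count(char) for a single character is exactly that character's
-- occurrence count (List.count on curr.toList).
def pvLoopA (full : List Char) : List Char → Int → Int → Int × Int
  | [], twos, threes => (twos, threes)
  | c :: rest, twos, threes =>
    let count : Nat := full.count c
    let twos := if twos = 0 ∧ count = 2 then 1 else twos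
    let threes := if threes = 0 ∧ count = 3 then 1 else threes
    if twos = 1 ∧ threes = 1 then (twos, threes)
    else pvLoopA full rest twos threes

def count_valid_boxes (acc : List Int) (curr : String) : List Int :=
  let r := pvLoopA curr.toList curr.toList 0 0
  -- acc[0] / acc[1]: IndexError (pyGet? = none) is excluded by Pre_
  match PySem.List.pyGet? acc 0, PySem.List.pyGet? acc 1 with
  | some a0, some a1 => [a0 + r.1, a1 + r.2]
  | _, _ => []

-- ===== PORT B =====
-- Source B's loop over sorted(curr) with state (runs, prev, run): a foldl over the sorted
-- characters; 'prev = None' initially = Option Char; the final 'if run: runs.append(run)'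
-- is the flush after the fold.
def pvStepB (st : List Int × Option Char × Int) (ch : Char) : List Int × Option Char × Int :=
  let (runs, prev, run) := st
  if some ch = prev then (runs, prev, run + 1)
  else ((if run ≠ 0 then runs ++ [run] else runs), some ch, 1)

def count_valid_boxes_alt (acc : List Int) (curr : String) : List Int :=
  let st := (PySem.List.sorted curr.toList (fun c => c.toNat)).foldl pvStepB ([], none, 0)
  let runs := if st.2.2 ≠ 0 then st.1 ++ [st.2.2] else st.1
  let twos : Int := if (2 : Int) ∈ runs then 1 else 0
  let threes : Int := if (3 : Int) ∈ runs then 1 else 0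
  -- acc[0] / acc[1]: IndexError (pyGet? = none) is excluded by Pre_
  (((PySem.List.pyGet? acc 0).bind fun a0 =>
      (PySem.List.pyGet? acc 1).map fun a1 => [a0 + twos, a1 + threes])).getD []

-- ===== PRECONDITION & SPEC =====
-- A reads acc[0] and acc[1] and raises IndexError when acc has fewer than two elements.
def Pre_count_valid_boxes (acc : List Int) (curr : String) : Prop := 2 ≤ acc.length
instance (acc : List Int) (curr : String) : Decidable (Pre_count_valid_boxes acc curr) := by unfold Pre_count_valid_boxes; infer_instance
def pvWitness_count_valid_boxes : List Int × String := ([0, 0], "aabbb")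

def Spec_count_valid_boxes (acc : List Int) (curr : String) (out : List Int) : Prop := out = count_valid_boxes_alt acc curr
instance (acc : List Int) (curr : String) (out : List Int) : Decidable (Spec_count_valid_boxes acc curr out) := by unfold Spec_count_valid_boxes; infer_instance

-- ===== CLAIM (what is proved, stated in full; the proofs are below) =====
def Claim_equal_count_valid_boxes : Prop := ∀ (acc : List Int) (curr : String), Dom_count_valid_boxes acc curr → Pre_count_valid_boxes acc curr → Spec_count_valid_boxes acc curr (count_valid_boxes acc curr)

-- ===== LEMMAS AND PROOFS =====

-- A's loop with 0/1-valued state computes the two existence indicators.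
lemma pvLoopA_eq (full : List Char) : ∀ (l : List Char) (t2 t3 : Int),
    (t2 = 0 ∨ t2 = 1) → (t3 = 0 ∨ t3 = 1) →
    pvLoopA full l t2 t3 =
      ((if t2 = 1 ∨ ∃ c ∈ l, full.count c = 2 then 1 else 0),
       (if t3 = 1 ∨ ∃ c ∈ l, full.count c = 3 then 1 else 0)) := by
  intro l
  induction l with
  | nil =>
    intro t2 t3 h2 h3
    simp only [pvLoopA, List.not_mem_nil, false_and, exists_false, or_false]
    rcases h2 with h2 | h2 <;> rcases h3 with h3 | h3 <;> simp [h2, h3]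
  | cons c rest ih =>
    intro t2 t3 h2 h3
    simp only [pvLoopA]
    by_cases hc2 : full.count c = 2 <;> by_cases hc3 : full.count c = 3 <;>
      rcases h2 with h2 | h2 <;> rcases h3 with h3 | h3 <;>
      simp only [h2, h3, hc2, hc3, List.mem_cons] <;>
      (rw [ih _ _ (by norm_num) (by norm_num)]; simp [hc2, hc3]; try tauto)

-- Run-length encoding of c^run ++ l, as Source B's loop produces it from the middle of a run.
def pvRleFrom (c : Char) (run : Int) : List Char → List Int
  | [] => [run]
  | d :: rest => if d = c then pvRleFrom c (run + 1) rest else run :: pvRleFrom d 1 rest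

-- Source B's fold, mid-run, appends exactly the remaining run lengths.
lemma pvFoldB_eq (l : List Char) : ∀ (runs : List Int) (c : Char) (r : Int), 0 < r →
    (let st := l.foldl pvStepB (runs, some c, r)
     if st.2.2 ≠ 0 then st.1 ++ [st.2.2] else st.1) = runs ++ pvRleFrom c r l := by
  induction l with
  | nil => intro runs c r hr; simp [pvRleFrom, hr.ne']
  | cons d rest ih =>
    intro runs c r hr
    simp only [List.foldl_cons, pvStepB, pvRleFrom]
    by_cases hdc : d = c
    · simp only [hdc, if_pos rfl]
      exact ih runs c (r + 1) (by omega)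
    · have : ¬ (some d = some c) := by simpa using hdc
      simp only [if_neg this, if_pos hr.ne', if_neg (by simpa using hdc)]
      rw [ih (runs ++ [r]) d 1 one_pos, List.append_assoc]
      rfl

-- In a sorted tail, membership among run lengths = membership among occurrence counts.
lemma pvRleFrom_mem (l : List Char) : ∀ (c : Char) (r : Int) (k : Int), 0 < r →
    (∀ d ∈ l, c ≤ d) → l.Pairwise (· ≤ ·) →
    (k ∈ pvRleFrom c r l ↔
      (k = r + (l.count c : Int) ∨ ∃ d ∈ l, d ≠ c ∧ k = (l.count d : Int))) := by
  induction l with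
  | nil => intro c r k hr _ _; simp [pvRleFrom]
  | cons d rest ih =>
    intro c r k hr hge hpw
    have hged : ∀ e ∈ rest, d ≤ e := (List.pairwise_cons.mp hpw).1
    have hpwr : rest.Pairwise (· ≤ ·) := (List.pairwise_cons.mp hpw).2
    simp only [pvRleFrom]
    by_cases hdc : d = c
    · subst hdc
      rw [if_pos rfl, ih d (r + 1) k (by omega) hged hpwr]
      constructor
      · rintro (h | ⟨e, he, hne, hk⟩)
        · left; rw [List.count_cons_self]; push_cast at h ⊢; omega
        · right; exact ⟨e, List.mem_cons_of_mem _ he, hne,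
            by rw [hk, List.count_cons_of_ne (fun h => hne h.symm)]⟩
      · rintro (h | ⟨e, he, hne, hk⟩)
        · left; rw [List.count_cons_self] at h; push_cast at h ⊢; omega
        · rcases List.mem_cons.mp he with rfl | he'
          · exact absurd rfl hne
          · exact Or.inr ⟨e, he', hne,
              by rw [hk, List.count_cons_of_ne (fun h => hne h.symm)]⟩
    · -- d ≠ c, and c ≤ d, so c < d ≤ every element of rest: c does not occur again
      have hcd : c < d := lt_of_le_of_ne (hge d (List.mem_cons_self)) (fun h => hdc h.symm)
      have hcnot : c ∉ rest := fun hc => absurd (hged c hc) (not_le.mpr hcd)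
      have hcnt0 : (d :: rest).count c = 0 :=
        List.count_eq_zero.mpr (by
          simp only [List.mem_cons, not_or]
          exact ⟨fun h => hdc h.symm, hcnot⟩)
      rw [if_neg hdc]
      simp only [List.mem_cons]
      rw [ih d 1 k one_pos hged hpwr]
      constructor
      · rintro (rfl | h | ⟨e, he, hne, hk⟩)
        · left; rw [hcnt0]; push_cast; omega
        · right; exact ⟨d, Or.inl rfl, hdc, by rw [List.count_cons_self]; push_cast at h ⊢; omega⟩
        · right
          refine ⟨e, Or.inr he, fun h => absurd (hged e he) ?_, by
            rw [hk, List.count_cons_of_ne (fun h => hne h.symm)]⟩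
          subst h; exact not_le.mpr hcd
      · rintro (h | ⟨e, he, hne, hk⟩)
        · left; rw [hcnt0] at h; push_cast at h; omega
        · rcases he with rfl | he'
          · right; left; rw [List.count_cons_self] at hk; push_cast at hk ⊢; omega
          · by_cases hed : e = d
            · subst hed; right; left
              rw [List.count_cons_self] at hk; push_cast at hk ⊢; omega
            · right; right
              exact ⟨e, he', hed, by rw [List.count_cons_of_ne (fun h => hed h.symm)] at hk; exact hk⟩

-- Source B's run list contains k (k ≥ 1) iff some character of curr occurs exactly k times.
lemma pvRuns_mem (curr : String) (k : Int) (hk : 0 < k) :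
    (let st := (PySem.List.sorted curr.toList (fun c => c.toNat)).foldl pvStepB ([], none, 0)
     k ∈ (if st.2.2 ≠ 0 then st.1 ++ [st.2.2] else st.1)) ↔
      ∃ c ∈ curr.toList, (curr.toList.count c : Int) = k := by
  have hperm := PySem.List.sorted_perm curr.toList (fun c => c.toNat) false
  have hpw : (PySem.List.sorted curr.toList (fun c => c.toNat) false).Pairwise (· ≤ ·) := by
    have := PySem.List.sorted_pairwise curr.toList (fun c => c.toNat)
    exact this.imp (fun {a b} h => by
      change a.toNat ≤ b.toNat at h
      exact Char.le_def.mpr (by exact_mod_cast h))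
  rcases hs : PySem.List.sorted curr.toList (fun c => c.toNat) false with _ | ⟨c, rest⟩
  · -- empty string: no runs, no characters
    have : curr.toList = [] := by
      have := hperm; rw [hs] at this; exact this.symm.eq_nil ▸ (List.Perm.nil_eq this).symm
    simp [hs, this, List.foldl_nil]
  · rw [hs] at hperm hpw
    have hmem : ∀ x, x ∈ c :: rest ↔ x ∈ curr.toList := fun x => hperm.mem_iff
    have hcnt : ∀ x, (c :: rest).count x = curr.toList.count x := fun x => hperm.count_eq x
    simp only [hs, List.foldl_cons]
    have hstep : pvStepB ([], none, 0) c = ([], some c, 1) := by simp [pvStepB]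
    rw [hstep, pvFoldB_eq rest [] c 1 one_pos]
    simp only [List.nil_append]
    rw [pvRleFrom_mem rest c 1 k one_pos (List.pairwise_cons.mp hpw).1 (List.pairwise_cons.mp hpw).2]
    constructor
    · rintro (h | ⟨d, hd, hne, hk'⟩)
      · exact ⟨c, (hmem c).mp List.mem_cons_self, by
          rw [← hcnt c, List.count_cons_self]; push_cast at h ⊢; omega⟩
      · exact ⟨d, (hmem d).mp (List.mem_cons_of_mem _ hd), by
          rw [← hcnt d, List.count_cons_of_ne (fun h => hne h.symm)]; exact hk'.symm⟩
    · rintro ⟨d, hd, hk'⟩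
      by_cases hdc : d = c
      · subst hdc
        left; rw [← hcnt d, List.count_cons_self] at hk'; push_cast at hk' ⊢; omega
      · right
        rcases List.mem_cons.mp ((hmem d).mpr hd) with rfl | hd'
        · exact absurd rfl hdc
        · exact ⟨d, hd', hdc, by
            rw [← hcnt d, List.count_cons_of_ne (fun h => hdc h.symm)] at hk'; exact hk'.symm⟩

-- ===== VERDICT (by name: the statement is the Claim_ definition above) =====
set_option maxRecDepth 4000 in
theorem count_valid_boxes_spec : Claim_equal_count_valid_boxes := by
  intro acc curr _ hpre
  unfold Pre_count_valid_boxes at hpre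
  unfold Spec_count_valid_boxes count_valid_boxes count_valid_boxes_alt
  rw [pvLoopA_eq curr.toList curr.toList 0 0 (Or.inl rfl) (Or.inl rfl)]
  have h2 := pvRuns_mem curr 2 (by norm_num)
  have h3 := pvRuns_mem curr 3 (by norm_num)
  have e2 : (∃ c ∈ curr.toList, (curr.toList.count c : Int) = 2) ↔
      (∃ c ∈ curr.toList, curr.toList.count c = 2) := by
    constructor <;> rintro ⟨c, hc, h⟩ <;> exact ⟨c, hc, by exact_mod_cast h⟩
  have e3 : (∃ c ∈ curr.toList, (curr.toList.count c : Int) = 3) ↔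
      (∃ c ∈ curr.toList, curr.toList.count c = 3) := by
    constructor <;> rintro ⟨c, hc, h⟩ <;> exact ⟨c, hc, by exact_mod_cast h⟩
  rw [e2] at h2
  rw [e3] at h3
  simp only [ne_eq, ite_not] at h2 h3
  rcases acc with _ | ⟨a0, _ | ⟨a1, rest⟩⟩
  · exact absurd hpre (by simp)
  · exact absurd hpre (by simp)
  · simp [PySem.List.pyGet?, PySem.List.pyIdx?, h2, h3, e2, e3,
      show (0 : Int) ≤ (rest.length : Int) + 1 from by positivity]
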